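-- pv_equiv track=rewrite | github.com/linode/linode_api4-python | linode_api4/util.py | generate_device_suffixes
-- ===== SOURCE A (Python) =====
-- import string
--
-- def generate_device_suffixes(n: int) -> list[str]:
--     """
--     Generate n alphabetical suffixes starting with a, b, c, etc.
--     After z, continue with aa, ab, ac, etc. followed by aaa, aab, etc.
--     Example:
--         generate_device_suffixes(30) ->
--         ['a', 'b', 'c', ..., 'z', 'aa', 'ab', 'ac', 'ad']
--     """
--     letters = string.ascii_lowercase
--     result = []
--     i = 0
--
--     while len(result) < n:
--         s = ""
--         x = i
--         while True:
--             s = letters[x % 26] + s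
--             x = x // 26 - 1
--             if x < 0:
--                 break
--         result.append(s)
--         i += 1
--     return result
-- ===== SOURCE B (Python) =====
-- def _inc_rev(rev):
--     # increment the reversed suffix as a bijective base-26 odometer
--     if not rev:
--         return ['a']
--     c = rev[0]
--     if c == 'z':
--         return ['a'] + _inc_rev(rev[1:])
--     return [chr(ord(c) + 1)] + rev[1:]
--
--
-- def _inc(cur):
--     return list(reversed(_inc_rev(list(reversed(cur)))))
--
--
-- def generate_device_suffixes(n: int) -> list[str]:
--     result, cur = [], ['a']
--     for _ in range(n):
--         result.append(''.join(cur))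
--         cur = _inc(cur)
--     return result
-- ===== Notes on version B (the rewrite author's own statement) =====
-- stated objective: alternative
-- what changed: Instead of recomputing each suffix from its index with repeated //26 divisions, B keeps the current suffix as a char list and increments it like an odometer (bump rightmost non-'z', turn trailing 'z's into 'a', prepend 'a' on full carry), emitting it once per step.
import Mathlib
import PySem

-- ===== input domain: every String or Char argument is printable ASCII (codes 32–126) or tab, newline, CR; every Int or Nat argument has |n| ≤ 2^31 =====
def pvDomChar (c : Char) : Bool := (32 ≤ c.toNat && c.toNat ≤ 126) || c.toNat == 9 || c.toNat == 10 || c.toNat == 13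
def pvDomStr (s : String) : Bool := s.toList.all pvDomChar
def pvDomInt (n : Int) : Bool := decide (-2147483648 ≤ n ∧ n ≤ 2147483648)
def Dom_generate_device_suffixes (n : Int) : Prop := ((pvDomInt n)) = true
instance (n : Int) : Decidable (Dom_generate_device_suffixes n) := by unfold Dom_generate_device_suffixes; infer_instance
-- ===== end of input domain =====

-- B replaces the per-index //26 digit computation by an odometer increment of the running suffix (alternative decomposition, same results).

-- ===== PORT A =====
-- letters = string.ascii_lowercase
def pvLetters : List Char :=
  ['a','b','c','d','e','f','g','h','i','j','k','l','m','n','o','p','q','r','s','t','u','v','w','x','y','z']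

-- inner 'while True' loop of A: s = letters[x % 26] + s; x = x // 26 - 1; break if x < 0
-- (x stays ≥ 0 in A since i ≥ 0, so Nat; 'x // 26 - 1 < 0' ⟺ x / 26 = 0)
def pvLoopA (x : Nat) (s : List Char) : List Char :=
  let s' := pvLetters.getD (x % 26) 'a' :: s
  if x / 26 = 0 then s' else pvLoopA (x / 26 - 1) s'
termination_by x
decreasing_by omega

-- outer 'while len(result) < n' loop: iteration i appends the string built by the inner loop for i
def generate_device_suffixes (n : Int) : List String :=
  (List.range n.toNat).map (fun i => String.ofList (pvLoopA i []))

-- ===== PORT B =====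
-- _inc_rev: recursion over the reversed suffix
def pvIncRev : List Char → List Char
  | [] => ['a']
  | c :: rest => if c = 'z' then 'a' :: pvIncRev rest else Char.ofNat (c.toNat + 1) :: rest

-- _inc
def pvInc (cur : List Char) : List Char := (pvIncRev cur.reverse).reverse

-- the 'for _ in range(n)' loop carrying (result, cur); written consuming the count
def pvLoopB : Nat → List Char → List String
  | 0, _ => []
  | k + 1, cur => String.ofList cur :: pvLoopB k (pvInc cur)

def generate_device_suffixes_alt (n : Int) : List String := pvLoopB n.toNat ['a']

-- ===== PRECONDITION & SPEC =====
def Spec_generate_device_suffixes (n : Int) (out : List String) : Prop := out = generate_device_suffixes_alt n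
instance (n : Int) (out : List String) : Decidable (Spec_generate_device_suffixes n out) := by unfold Spec_generate_device_suffixes; infer_instance

-- ===== CLAIM (what is proved, stated in full; the proofs are below) =====
def Claim_equal_generate_device_suffixes : Prop := ∀ (n : Int), Dom_generate_device_suffixes n → Spec_generate_device_suffixes n (generate_device_suffixes n)

-- ===== LEMMAS AND PROOFS =====

-- one-step unfolding of the inner loop
theorem pvLoopA_unfold (x : Nat) (s : List Char) : pvLoopA x s =
    if x / 26 = 0 then pvLetters.getD (x % 26) 'a' :: s
    else pvLoopA (x / 26 - 1) (pvLetters.getD (x % 26) 'a' :: s) := by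
  rw [pvLoopA]

-- the inner loop accumulates on the right
theorem pvLoopA_acc (x : Nat) : ∀ s : List Char, pvLoopA x s = pvLoopA x [] ++ s := by
  induction x using Nat.strong_induction_on with
  | _ x ih =>
    intro s
    by_cases h : x / 26 = 0
    · rw [pvLoopA_unfold x s, pvLoopA_unfold x [], if_pos h, if_pos h]; simp
    · rw [pvLoopA_unfold x s, pvLoopA_unfold x [], if_neg h, if_neg h,
        ih (x / 26 - 1) (by omega) (pvLetters.getD (x % 26) 'a' :: s),
        ih (x / 26 - 1) (by omega) [pvLetters.getD (x % 26) 'a']]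
      simp

-- recurrence for A's digit string
theorem pvDigits_rec (x : Nat) :
    pvLoopA x [] = (if x / 26 = 0 then [] else pvLoopA (x / 26 - 1) []) ++ [pvLetters.getD (x % 26) 'a'] := by
  rw [pvLoopA_unfold x []]
  by_cases h : x / 26 = 0
  · simp [h]
  · rw [if_neg h, if_neg h, pvLoopA_acc]

theorem pvLetter_bump : ∀ k : Nat, k < 25 →
    Char.ofNat ((pvLetters.getD k 'a').toNat + 1) = pvLetters.getD (k + 1) 'a' := by decide

theorem pvLetter_ne_z : ∀ k : Nat, k < 25 → pvLetters.getD k 'a' ≠ 'z' := by decide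

-- carrying over a trailing 'z'
theorem pvInc_append_z (l : List Char) : pvInc (l ++ ['z']) = pvInc l ++ ['a'] := by
  simp [pvInc, pvIncRev]

-- bumping a trailing non-'z'
theorem pvInc_append_ne (l : List Char) (c : Char) (h : c ≠ 'z') :
    pvInc (l ++ [c]) = l ++ [Char.ofNat (c.toNat + 1)] := by
  simp [pvInc, pvIncRev, h]

-- the key invariant: the odometer increment maps A's digit string for x to the one for x + 1
theorem pvInc_digits (x : Nat) : pvInc (pvLoopA x []) = pvLoopA (x + 1) [] := by
  induction x using Nat.strong_induction_on with
  | _ x ih =>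
    by_cases hz : x % 26 = 25
    · -- last digit is 'z': carry
      have h26 : pvLetters.getD (x % 26) 'a' = 'z' := by rw [hz]; decide
      by_cases h : x / 26 = 0
      · have hx : x = 25 := by omega
        subst hx
        have d25 : pvLoopA 25 [] = ['z'] := by
          rw [pvLoopA_unfold, if_pos (by decide : (25 : Nat) / 26 = 0)]; decide
        have d26 : pvLoopA (25 + 1) [] = ['a', 'a'] := by
          rw [pvLoopA_unfold, if_neg (by decide : ¬ (25 + 1 : Nat) / 26 = 0),
            pvLoopA_unfold, if_pos (by decide : ((25 + 1 : Nat) / 26 - 1) / 26 = 0)]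
          decide
        rw [d25, d26]; decide
      · rw [pvDigits_rec x, pvDigits_rec (x + 1), h26, if_neg h, pvInc_append_z,
          ih (x / 26 - 1) (by omega), show x / 26 - 1 + 1 = x / 26 from by omega,
          show (x + 1) % 26 = 0 from by omega,
          if_neg (show ¬ (x + 1) / 26 = 0 from by omega),
          show (x + 1) / 26 - 1 = x / 26 from by omega,
          show pvLetters.getD 0 'a' = 'a' from by decide]
    · -- last digit is not 'z': bump it
      have hk : x % 26 < 25 := by omega
      rw [pvDigits_rec x, pvDigits_rec (x + 1),
        pvInc_append_ne _ _ (pvLetter_ne_z (x % 26) hk), pvLetter_bump (x % 26) hk,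
        show (x + 1) % 26 = x % 26 + 1 from by omega,
        show (x + 1) / 26 = x / 26 from by omega]

-- B's loop starting from the digit string of i produces A's strings for i, i+1, …
theorem pvLoopB_eq (m : Nat) : ∀ i : Nat,
    pvLoopB m (pvLoopA i []) = (List.range m).map (fun j => String.ofList (pvLoopA (i + j) [])) := by
  induction m with
  | zero => intro i; simp [pvLoopB]
  | succ k ih =>
    intro i
    rw [pvLoopB, pvInc_digits i, ih (i + 1), List.range_succ_eq_map, List.map_cons, List.map_map]
    have hf : (fun j => String.ofList (pvLoopA (i + 1 + j) []))
        = (String.ofList ∘ fun j : Nat => pvLoopA (i + j) []) ∘ Nat.succ := by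
      funext j
      simp only [Function.comp]
      rw [show i + 1 + j = i + Nat.succ j from by omega]
    rw [hf]
    simp

-- ===== VERDICT (by name: the statement is the Claim_ definition above) =====
theorem generate_device_suffixes_spec : Claim_equal_generate_device_suffixes := by
  intro n _
  show generate_device_suffixes n = generate_device_suffixes_alt n
  unfold generate_device_suffixes generate_device_suffixes_alt
  rw [show (['a'] : List Char) = pvLoopA 0 [] from by
      rw [pvLoopA_unfold, if_pos (by decide : (0 : Nat) / 26 = 0)]; decide,
    pvLoopB_eq n.toNat 0]
  simp only [Nat.zero_add]
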